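-- pv_equiv track=rewrite | github.com/vv4t/math3411 | compression_coding.py | instant_decode
-- ===== SOURCE A (Python) =====
-- def instant_decode(m, C):
--   """
--   converts an encoded message into array of symbol indexes given a code set
--   m - message str e.g. 010100
--   C - codeword set e.g. [1,01,00]
--   e.g. instant_decode("010100", [1,01,00]) -> [1,1,2] which is s2s2s3
--   """
--   s = []
--
--   while m:
--     for i, c in enumerate(C):
--       if m.startswith(c):
--         s.append(i)
--         m = m[len(c):]
--
--   return s
-- ===== SOURCE B (Python) =====
-- def instant_decode(m, C):
--   """
--   Single pass over m with an incremental buffer and a codeword->index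
--   dictionary: no repeated startswith scans over the codeword set.
--   """
--   idx = {c: i for i, c in enumerate(C)}
--   s = []
--   buf = ""
--   for ch in m:
--     buf += ch
--     j = idx.get(buf)
--     if j is not None:
--       s.append(j)
--       buf = ""
--   return s
-- ===== Notes on version B (the rewrite author's own statement) =====
-- stated objective: alternative
-- what changed: Instead of repeatedly scanning the whole codeword set with startswith and restarting the while-loop, B makes one pass over the message, growing a character buffer and looking it up in a codeword->index dictionary built once (intended as faster; a timing run could not obtain a clean measurement).
-- outside the precondition, e.g. on instant_decode('111', ['11', '1']): A returns [0, 1], B returns [1, 1, 1]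
import Mathlib
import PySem

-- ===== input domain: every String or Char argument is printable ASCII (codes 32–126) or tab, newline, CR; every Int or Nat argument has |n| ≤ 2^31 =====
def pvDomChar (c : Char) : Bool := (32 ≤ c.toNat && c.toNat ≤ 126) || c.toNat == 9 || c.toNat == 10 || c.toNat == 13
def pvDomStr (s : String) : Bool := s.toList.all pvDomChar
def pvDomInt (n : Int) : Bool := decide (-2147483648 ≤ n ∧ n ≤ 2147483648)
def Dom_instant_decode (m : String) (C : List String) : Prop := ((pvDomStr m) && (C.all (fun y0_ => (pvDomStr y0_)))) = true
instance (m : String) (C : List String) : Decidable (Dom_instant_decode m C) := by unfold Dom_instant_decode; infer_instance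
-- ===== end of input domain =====

-- B replaces A's repeated startswith scans over the codeword set by a single pass over the
-- message with an incremental buffer looked up in a codeword->index dictionary built once
-- (objective: alternative; intended as faster, but a timing run could not measure a ratio).


-- ===== PORT A =====
-- inner 'for i, c in enumerate(C): if m.startswith(c): s.append(i); m = m[len(c):]'
def pvStepA (st : List Char × List Int) (ic : Int × List Char) : List Char × List Int :=
  if PySem.Chars.startswith st.1 ic.2
  then (PySem.List.slice st.1 (some (PySem.Chars.len ic.2)) none, st.2 ++ [ic.1])
  else st

-- 'while m:' — fueled; on every input admitted by Pre_ each pass strips at least one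
-- character, so fuel (length m + 1) never runs out there (Python A diverges outside Pre_)
def pvWhileA (C : List (List Char)) : Nat → List Char → List Int → List Int
  | 0, _, s => s
  | fuel + 1, m, s =>
    if m = [] then s
    else
      let st := (PySem.List.enumerate C 0).foldl pvStepA (m, s)
      pvWhileA C fuel st.1 st.2

def instant_decode (m : String) (C : List String) : List Int :=
  pvWhileA (C.map String.toList) (m.toList.length + 1) m.toList []

-- ===== PORT B =====
-- 'idx = {c: i for i, c in enumerate(C)}'
def pvIdx (C : List (List Char)) : PySem.Dict (List Char) Int :=
  PySem.Dict.ofList ((PySem.List.enumerate C 0).map (fun ic => (ic.2, ic.1)))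

-- 'for ch in m: buf += ch; j = idx.get(buf); if j is not None: s.append(j); buf = ""'
def pvScanB (d : PySem.Dict (List Char) Int) : List Char → List Char → List Int → List Int
  | [], _, s => s
  | ch :: rest, buf, s =>
    match d.get? (buf ++ [ch]) with
    | some j => pvScanB d rest [] (s ++ [j])
    | none => pvScanB d rest (buf ++ [ch]) s

def instant_decode_alt (m : String) (C : List String) : List Int :=
  pvScanB (pvIdx (C.map String.toList)) m.toList [] []

-- ===== PRECONDITION & SPEC =====
-- 'm is a concatenation of codewords': the mathematical decodability condition (it decides
-- whether a decomposition exists; it computes no output of either program)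
def pvDecF (C : List (List Char)) : Nat → List Char → Bool
  | _, [] => true
  | 0, _ :: _ => false
  | fuel + 1, ch :: t => C.any (fun c => !c.isEmpty && c.isPrefixOf (ch :: t) && pvDecF C fuel (t.drop (c.length - 1)))

def pvDec (C : List (List Char)) (m : List Char) : Bool := pvDecF C m.length m

theorem pvDecF_congr (C : List (List Char)) :
    ∀ (f1 : Nat) (f2 : Nat) (m : List Char), m.length ≤ f1 → m.length ≤ f2 →
    pvDecF C f1 m = pvDecF C f2 m := by
  intro f1
  induction f1 with
  | zero =>
    intro f2 m h1 _
    have : m = [] := List.eq_nil_of_length_eq_zero (by omega)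
    subst this
    cases f2 <;> rfl
  | succ g1 ih =>
    intro f2 m h1 h2
    cases m with
    | nil => cases f2 <;> rfl
    | cons ch t =>
      cases f2 with
      | zero => simp at h2
      | succ g2 =>
        simp only [pvDecF]
        apply PySem.List.any_congr_mem
        intro c _
        congr 1
        apply ih
        · simp at h1 ⊢; omega
        · simp at h2 ⊢; omega

theorem pvDec_cons (C : List (List Char)) (ch : Char) (t : List Char) :
    pvDec C (ch :: t) = C.any (fun c => !c.isEmpty && c.isPrefixOf (ch :: t) && pvDec C (t.drop (c.length - 1))) := by
  show pvDecF C (t.length + 1) (ch :: t) = _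
  simp only [pvDecF]
  apply PySem.List.any_congr_mem
  intro c _
  congr 1
  apply pvDecF_congr
  · simp
  · simp

theorem pvDec_of_parts (C : List (List Char)) :
    ∀ (ws : List (List Char)) (m : List Char), (∀ w ∈ ws, w ∈ C) → ws.flatten = m →
    pvDec C m = true := by
  intro ws
  induction ws with
  | nil =>
    intro m _ hfl
    subst hfl
    rfl
  | cons w ws' ih =>
    intro m hmem hfl
    cases hw : w with
    | nil =>
      apply ih (m := m) (fun v hv => hmem v (List.mem_cons_of_mem _ hv))
      subst hw
      simpa using hfl
    | cons x w' =>
      subst hw hfl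
      rw [show ((x :: w') :: ws').flatten = x :: (w' ++ ws'.flatten) by simp]
      rw [pvDec_cons, List.any_eq_true]
      refine ⟨x :: w', hmem _ List.mem_cons_self, ?_⟩
      simp only [Bool.and_eq_true, Bool.not_eq_true', List.isEmpty_eq_false_iff,
        List.isPrefixOf_iff_prefix]
      refine ⟨⟨by simp, ⟨ws'.flatten, by simp⟩⟩, ?_⟩
      have : (w' ++ ws'.flatten).drop ((x :: w').length - 1) = ws'.flatten := by
        simp
      rw [this]
      exact ih ws'.flatten (fun v hv => hmem v (List.mem_cons_of_mem _ hv)) rfl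

theorem pvDec_parts (C : List (List Char)) :
    ∀ (n : Nat) (m : List Char), m.length ≤ n → pvDec C m = true →
    ∃ ws : List (List Char), (∀ w ∈ ws, w ∈ C) ∧ ws.flatten = m := by
  intro n
  induction n with
  | zero =>
    intro m h _
    have : m = [] := List.eq_nil_of_length_eq_zero (by omega)
    subst this
    exact ⟨[], by simp, rfl⟩
  | succ n ih =>
    intro m hlen hm
    cases m with
    | nil => exact ⟨[], by simp, rfl⟩
    | cons ch t =>
      rw [pvDec_cons, List.any_eq_true] at hm
      obtain ⟨c, hcmem, hc⟩ := hm
      simp only [Bool.and_eq_true, Bool.not_eq_true', List.isEmpty_eq_false_iff,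
        List.isPrefixOf_iff_prefix] at hc
      obtain ⟨⟨hcne, hcp⟩, hcd⟩ := hc
      obtain ⟨r, hr⟩ := hcp
      have h1 : 1 ≤ c.length := List.length_pos_iff.mpr hcne
      have hdrop : t.drop (c.length - 1) = r := by
        have : (ch :: t).drop c.length = r := by rw [← hr, List.drop_left]
        cases hcl : c.length with
        | zero => omega
        | succ u => rw [hcl] at this; simpa using this
      rw [hdrop] at hcd
      have hrlen : r.length ≤ n := by
        have := congrArg List.length hr
        simp at this hlen
        omega
      obtain ⟨ws, hws, hfl⟩ := ih r hrlen hcd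
      exact ⟨c :: ws, by
        intro w hw
        rcases List.mem_cons.mp hw with h | h
        · exact h ▸ hcmem
        · exact hws w h, by simp [hfl, hr]⟩

-- Pre_ admits any empty message and otherwise requires an instantaneous (prefix-free, no empty
-- codeword) code with m a concatenation of codewords.  It excludes inputs where Python A loops
-- forever (empty codeword reached, message not a concatenation of codewords) and non-prefix-free
-- codeword sets, on which A's result depends on where its inner scan happens to resume
-- (e.g. ("111", ["11","1"]): A returns [0,1], B returns [1,1,1]).
def Pre_instant_decode (m : String) (C : List String) : Prop :=
  m.toList = [] ∨
  (∀ c ∈ C.map String.toList, c ≠ []) ∧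
  (C.map String.toList).Pairwise (fun a b => a.isPrefixOf b = false ∧ b.isPrefixOf a = false) ∧
  ∃ ws : List (List Char), (∀ w ∈ ws, w ∈ C.map String.toList) ∧ ws.flatten = m.toList
instance (m : String) (C : List String) : Decidable (Pre_instant_decode m C) :=
  decidable_of_iff
    (m.toList = [] ∨
     (∀ c ∈ C.map String.toList, c ≠ []) ∧
     (C.map String.toList).Pairwise (fun a b => a.isPrefixOf b = false ∧ b.isPrefixOf a = false) ∧
     pvDec (C.map String.toList) m.toList = true)
    (by
      unfold Pre_instant_decode
      constructor
      · rintro (h0 | ⟨h1, h2, h3⟩)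
        · exact Or.inl h0
        · exact Or.inr ⟨h1, h2, pvDec_parts _ _ _ (le_refl _) h3⟩
      · rintro (h0 | ⟨h1, h2, ws, hws, hfl⟩)
        · exact Or.inl h0
        · exact Or.inr ⟨h1, h2, pvDec_of_parts _ ws _ hws hfl⟩)

def pvWitness_instant_decode : String × List String := ("010100", ["1", "01", "00"])

def Spec_instant_decode (m : String) (C : List String) (out : List Int) : Prop := out = instant_decode_alt m C
instance (m : String) (C : List String) (out : List Int) : Decidable (Spec_instant_decode m C out) := by unfold Spec_instant_decode; infer_instance

-- ===== CLAIM (what is proved, stated in full; the proofs are below) =====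
def Claim_equal_instant_decode : Prop := ∀ (m : String) (C : List String), Dom_instant_decode m C → Pre_instant_decode m C → Spec_instant_decode m C (instant_decode m C)

-- ===== LEMMAS AND PROOFS =====

-- the unique greedy decoding both programs compute (proof-only specification)
def pvG (C : List (List Char)) : List Char → List Int
  | [] => []
  | ch :: t =>
    match (PySem.List.enumerate C 0).find? (fun ic => !ic.2.isEmpty && ic.2.isPrefixOf (ch :: t)) with
    | some ic => ic.1 :: pvG C (t.drop (ic.2.length - 1))
    | none => []
termination_by m => m.length
decreasing_by simp only [List.length_drop, List.length_cons]; omega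

theorem pv_mem_enum {Cl : List (List Char)} {p : Int × List Char}
    (h : p ∈ PySem.List.enumerate Cl 0) :
    ∃ k : Nat, ∃ _ : k < Cl.length, p = ((k : Int), Cl[k]) := by
  rw [PySem.List.mem_enumerate_iff] at h
  obtain ⟨k, hk, hp⟩ := h
  exact ⟨k, hk, by simpa using hp⟩

theorem pv_enum_mem {Cl : List (List Char)} {k : Nat} (hk : k < Cl.length) :
    ((k : Int), Cl[k]) ∈ PySem.List.enumerate Cl 0 := by
  rw [PySem.List.mem_enumerate_iff]
  exact ⟨k, hk, by simp⟩

-- value-level uniqueness of a matching codeword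
theorem pv_uniq {Cl : List (List Char)}
    (hPF : Cl.Pairwise (fun a b => a.isPrefixOf b = false ∧ b.isPrefixOf a = false))
    {i j : Nat} (hi : i < Cl.length) (hj : j < Cl.length) {m : List Char}
    (hpi : Cl[i] <+: m) (hpj : Cl[j] <+: m) : i = j := by
  rw [List.pairwise_iff_getElem] at hPF
  by_contra hne
  rcases List.prefix_or_prefix_of_prefix hpi hpj with h | h
  · rcases Nat.lt_or_ge i j with hij | hij
    · exact absurd (List.isPrefixOf_iff_prefix.mpr h) (by simp [(hPF i j hi hj hij).1])
    · exact absurd (List.isPrefixOf_iff_prefix.mpr h) (by simp [(hPF j i hj hi (by omega)).2])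
  · rcases Nat.lt_or_ge i j with hij | hij
    · exact absurd (List.isPrefixOf_iff_prefix.mpr h) (by simp [(hPF i j hi hj hij).2])
    · exact absurd (List.isPrefixOf_iff_prefix.mpr h) (by simp [(hPF j i hj hi (by omega)).1])

theorem pv_nodup {Cl : List (List Char)}
    (hPF : Cl.Pairwise (fun a b => a.isPrefixOf b = false ∧ b.isPrefixOf a = false)) :
    Cl.Nodup := by
  refine hPF.imp ?_
  intro a b ⟨h1, _⟩ hab
  subst hab
  exact absurd (List.isPrefixOf_iff_prefix.mpr (List.prefix_refl a)) (by simp [h1])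

theorem pv_find_unique {α : Type} (p : α → Bool) {l : List α} {a : α}
    (ha : a ∈ l) (hpa : p a = true) (huniq : ∀ b ∈ l, p b = true → b = a) :
    l.find? p = some a := by
  induction l with
  | nil => cases ha
  | cons x xs ih =>
    by_cases hx : p x = true
    · have hxa : x = a := huniq x (List.mem_cons_self) hx
      subst hxa
      simp [hx]
    · have hxa : a ≠ x := fun h => hx (h ▸ hpa)
      have ha' : a ∈ xs := by
        rcases List.mem_cons.mp ha with h | h
        · exact absurd h hxa
        · exact h
      simp only [List.find?_cons, Bool.not_eq_true] at *
      simp [hx]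
      exact ih ha' (fun b hb hpb => huniq b (List.mem_cons_of_mem _ hb) hpb)

theorem pv_find_eq {Cl : List (List Char)}
    (hPF : Cl.Pairwise (fun a b => a.isPrefixOf b = false ∧ b.isPrefixOf a = false))
    {m : List Char} {k : Nat} (hk : k < Cl.length) (hne : Cl[k] ≠ [])
    (hp : Cl[k] <+: m) :
    (PySem.List.enumerate Cl 0).find? (fun ic => !ic.2.isEmpty && ic.2.isPrefixOf m)
      = some ((k : Int), Cl[k]) := by
  apply pv_find_unique _ (pv_enum_mem hk)
  · simp [List.isPrefixOf_iff_prefix, hp, hne]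
  · intro b hb hpb
    obtain ⟨j, hj, rfl⟩ := pv_mem_enum hb
    simp only [Bool.and_eq_true, Bool.not_eq_true', List.isEmpty_eq_false_iff,
      List.isPrefixOf_iff_prefix] at hpb
    have := pv_uniq hPF hj hk hpb.2 hp
    subst this; rfl

theorem pv_dec_drop {Cl : List (List Char)}
    (hPF : Cl.Pairwise (fun a b => a.isPrefixOf b = false ∧ b.isPrefixOf a = false))
    {m : List Char} (hm : pvDec Cl m = true) {k : Nat} (hk : k < Cl.length)
    (hne : Cl[k] ≠ []) (hp : Cl[k] <+: m) :
    pvDec Cl (m.drop Cl[k].length) = true := by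
  have hmne : m ≠ [] := by
    intro h; subst h
    exact hne (List.prefix_nil.mp hp)
  obtain ⟨ch, t, rfl⟩ := List.exists_cons_of_ne_nil hmne
  rw [pvDec_cons] at hm
  rw [List.any_eq_true] at hm
  obtain ⟨c, hcmem, hc⟩ := hm
  simp only [Bool.and_eq_true, Bool.not_eq_true', List.isEmpty_eq_false_iff,
    List.isPrefixOf_iff_prefix] at hc
  obtain ⟨j, hj, rfl⟩ := List.mem_iff_getElem.mp hcmem
  have hjk : j = k := pv_uniq hPF hj hk hc.1.2 hp
  subst hjk
  have hlen : 1 ≤ Cl[j].length := List.length_pos_iff.mpr hne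
  have : (ch :: t).drop Cl[j].length = t.drop (Cl[j].length - 1) := by
    cases h : Cl[j].length with
    | zero => omega
    | succ n => simp
  rw [this]
  exact hc.2

theorem pv_G_cons {Cl : List (List Char)}
    (hPF : Cl.Pairwise (fun a b => a.isPrefixOf b = false ∧ b.isPrefixOf a = false))
    {m : List Char} {k : Nat} (hk : k < Cl.length) (hne : Cl[k] ≠ [])
    (hp : Cl[k] <+: m) :
    pvG Cl m = (k : Int) :: pvG Cl (m.drop Cl[k].length) := by
  have hmne : m ≠ [] := by
    intro h; subst h; exact hne (List.prefix_nil.mp hp)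
  obtain ⟨ch, t, rfl⟩ := List.exists_cons_of_ne_nil hmne
  rw [pvG]
  rw [pv_find_eq hPF hk hne hp]
  have hlen : 1 ≤ Cl[k].length := List.length_pos_iff.mpr hne
  have : (ch :: t).drop Cl[k].length = t.drop (Cl[k].length - 1) := by
    cases h : Cl[k].length with
    | zero => omega
    | succ n => simp
  rw [this]

-- one pass of A's inner for-loop over a sublist E of enumerate(C)
theorem pv_pass {Cl : List (List Char)}
    (hNE : ∀ c ∈ Cl, c ≠ [])
    (hPF : Cl.Pairwise (fun a b => a.isPrefixOf b = false ∧ b.isPrefixOf a = false)) :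
    ∀ (E : List (Int × List Char)), E.Sublist (PySem.List.enumerate Cl 0) →
    ∀ (m : List Char) (s : List Int), pvDec Cl m = true →
    ∃ (m' : List Char) (l : List Int),
      E.foldl pvStepA (m, s) = (m', s ++ l) ∧
      pvDec Cl m' = true ∧
      pvG Cl m = l ++ pvG Cl m' ∧
      m'.length + l.length ≤ m.length ∧
      ((∃ ic ∈ E, ic.2.isPrefixOf m = true) → l ≠ []) := by
  intro E
  induction E with
  | nil =>
    intro _ m s hm
    exact ⟨m, [], by simp, hm, by simp, by simp, by simp⟩
  | cons hd E' ih =>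
    intro hsub m s hm
    have hhd : hd ∈ PySem.List.enumerate Cl 0 := hsub.subset List.mem_cons_self
    have hsub' : E'.Sublist (PySem.List.enumerate Cl 0) :=
      (List.sublist_cons_self hd E').trans hsub
    obtain ⟨k, hk, rfl⟩ := pv_mem_enum hhd
    by_cases hmatch : Cl[k].isPrefixOf m = true
    · -- the head matches: strip it, append k
      have hne : Cl[k] ≠ [] := hNE _ (List.getElem_mem hk)
      have hpfx : Cl[k] <+: m := List.isPrefixOf_iff_prefix.mp hmatch
      have hstep : pvStepA (m, s) ((k : Int), Cl[k])
          = (m.drop Cl[k].length, s ++ [(k : Int)]) := by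
        simp only [pvStepA, PySem.Chars.startswith, hmatch, if_true]
        simp [PySem.Chars.len, PySem.List.slice_from_natCast]
      have hdec' : pvDec Cl (m.drop Cl[k].length) = true := pv_dec_drop hPF hm hk hne hpfx
      obtain ⟨m', l', hfold, hdec'', hG, hlen, _⟩ :=
        ih hsub' (m.drop Cl[k].length) (s ++ [(k : Int)]) hdec'
      refine ⟨m', (k : Int) :: l', ?_, hdec'', ?_, ?_, by simp⟩
      · simpa [hstep] using hfold
      · rw [pv_G_cons hPF hk hne hpfx, hG]; simp
      · have h1 : 1 ≤ Cl[k].length := List.length_pos_iff.mpr hne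
        have h2 : Cl[k].length ≤ m.length := hpfx.length_le
        have h3 : (m.drop Cl[k].length).length = m.length - Cl[k].length := by simp
        simp only [List.length_cons]
        omega
    · -- the head does not match: state unchanged
      have hstep : pvStepA (m, s) ((k : Int), Cl[k]) = (m, s) := by
        simp [pvStepA, PySem.Chars.startswith, hmatch]
      obtain ⟨m', l', hfold, hdec', hG, hlen, hprog⟩ := ih hsub' m s hm
      refine ⟨m', l', by simpa [hstep] using hfold, hdec', hG, hlen, ?_⟩
      rintro ⟨ic, hic, hicp⟩
      rcases List.mem_cons.mp hic with h | h
      · subst h; exact absurd hicp hmatch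
      · exact hprog ⟨ic, h, hicp⟩

theorem pv_while {Cl : List (List Char)}
    (hNE : ∀ c ∈ Cl, c ≠ [])
    (hPF : Cl.Pairwise (fun a b => a.isPrefixOf b = false ∧ b.isPrefixOf a = false)) :
    ∀ (n : Nat) (m : List Char) (s : List Int), pvDec Cl m = true → m.length < n →
    pvWhileA Cl n m s = s ++ pvG Cl m := by
  intro n
  induction n with
  | zero => intro m s _ h; omega
  | succ n ih =>
    intro m s hm hlt
    by_cases hmnil : m = []
    · subst hmnil
      simp [pvWhileA, pvG]
    · obtain ⟨m', l, hfold, hdec', hG, hlen, hprog⟩ :=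
        pv_pass hNE hPF (PySem.List.enumerate Cl 0) (List.Sublist.refl _) m s hm
      -- the pass makes progress: m is decodable and nonempty, so some codeword matches
      have hlne : l ≠ [] := by
        apply hprog
        obtain ⟨ch, t, rfl⟩ := List.exists_cons_of_ne_nil hmnil
        rw [pvDec_cons, List.any_eq_true] at hm
        obtain ⟨c, hcmem, hc⟩ := hm
        simp only [Bool.and_eq_true] at hc
        obtain ⟨j, hj, rfl⟩ := List.mem_iff_getElem.mp hcmem
        exact ⟨((j : Int), Cl[j]), pv_enum_mem hj, hc.1.2⟩
      have hml : m' ≠ m ∨ m'.length < m.length := by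
        right
        have : 1 ≤ l.length := List.length_pos_iff.mpr hlne
        omega
      rw [pvWhileA]
      simp only [hmnil, if_false]
      rw [hfold, ih m' (s ++ l) hdec' (by
        have : 1 ≤ l.length := List.length_pos_iff.mpr hlne
        omega)]
      rw [hG, List.append_assoc]

-- the dictionary built by B: lookups
theorem pv_idx_items {Cl : List (List Char)} (hnd : Cl.Nodup) :
    (pvIdx Cl).items = (PySem.List.enumerate Cl 0).map (fun ic => (ic.2, ic.1)) := by
  unfold pvIdx PySem.Dict.ofList PySem.Dict.update
  have hmap : (List.map (fun ic => (ic.2, ic.1)) (PySem.List.enumerate Cl 0)).map Prod.fst = Cl := by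
    rw [List.map_map]
    exact PySem.List.map_snd_enumerate Cl 0
  have := PySem.Dict.items_foldl_insert_fresh
    ((PySem.List.enumerate Cl 0).map (fun ic => (ic.2, ic.1)))
    Prod.fst Prod.snd PySem.Dict.empty
    (by intro a _; simp [PySem.Dict.contains_empty])
    (by rw [hmap]; exact hnd)
  simpa using this

theorem pv_idx_get_some {Cl : List (List Char)} (hnd : Cl.Nodup) {k : Nat}
    (hk : k < Cl.length) : (pvIdx Cl).get? Cl[k] = some (k : Int) := by
  apply PySem.Dict.get?_of_mem_items
  · rw [pv_idx_items hnd]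
    exact List.mem_map.mpr ⟨((k : Int), Cl[k]), pv_enum_mem hk, rfl⟩
  · exact PySem.Dict.nodup_keys_ofList _

theorem pv_idx_get_none {Cl : List (List Char)} {p : List Char} (hp : p ∉ Cl) :
    (pvIdx Cl).get? p = none := by
  rw [PySem.Dict.get?_eq_none_iff_not_mem_keys]
  intro hmem
  apply hp
  have hkeys : (pvIdx Cl).keys = PySem.Set.update (PySem.Dict.empty (κ := List Char) (ν := Int)).keys
      (((PySem.List.enumerate Cl 0).map (fun ic => (ic.2, ic.1))).map Prod.fst) := by
    unfold pvIdx PySem.Dict.ofList PySem.Dict.update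
    exact PySem.Dict.keys_foldl_insert_key _ Prod.fst (fun _ p => p.2) _
  rw [hkeys] at hmem
  have hmap : (List.map (fun ic => (ic.2, ic.1)) (PySem.List.enumerate Cl 0)).map Prod.fst = Cl := by
    rw [List.map_map]
    exact PySem.List.map_snd_enumerate Cl 0
  rw [hmap] at hmem
  have : PySem.Set.update (PySem.Dict.empty (κ := List Char) (ν := Int)).keys Cl
      = PySem.Set.ofList Cl := by rfl
  rw [this, PySem.Set.mem_ofList] at hmem
  exact hmem

-- B's scan consumes one whole codeword and emits its index
theorem pv_scan_code {Cl : List (List Char)}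
    (hPF : Cl.Pairwise (fun a b => a.isPrefixOf b = false ∧ b.isPrefixOf a = false))
    {k : Nat} (hk : k < Cl.length) :
    ∀ (q buf : List Char) (rest : List Char) (s : List Int),
      buf ++ q = Cl[k] → q ≠ [] →
      pvScanB (pvIdx Cl) (q ++ rest) buf s = pvScanB (pvIdx Cl) rest [] (s ++ [(k : Int)]) := by
  have hnd : Cl.Nodup := pv_nodup hPF
  intro q
  induction q with
  | nil => intro _ _ _ _ hq; exact absurd rfl hq
  | cons x q' ih =>
    intro buf rest s heq hq
    by_cases hq' : q' = []
    · subst hq'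
      have hbuf : buf ++ [x] = Cl[k] := by simpa using heq
      rw [List.cons_append, pvScanB, hbuf, pv_idx_get_some hnd hk]
      simp
    · have hbuf : (buf ++ [x]) ++ q' = Cl[k] := by simpa using heq
      have hpfx : (buf ++ [x]) <+: Cl[k] := ⟨q', hbuf⟩
      have hne : buf ++ [x] ≠ Cl[k] := by
        intro h
        have l1 := congrArg List.length hbuf
        have l2 := congrArg List.length h
        simp at l1 l2
        exact hq' (List.eq_nil_of_length_eq_zero (by omega))
      have hnotin : (buf ++ [x]) ∉ Cl := by
        intro hmem
        obtain ⟨j, hj, hjeq⟩ := List.mem_iff_getElem.mp hmem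
        have hjk : j = k := pv_uniq hPF hj hk (m := Cl[k]) (by rw [hjeq]; exact hpfx) (List.prefix_refl _)
        subst hjk
        exact hne hjeq.symm
      rw [List.cons_append, pvScanB, pv_idx_get_none hnotin]
      exact ih (buf ++ [x]) rest s hbuf hq'

theorem pv_scanB {Cl : List (List Char)}
    (hPF : Cl.Pairwise (fun a b => a.isPrefixOf b = false ∧ b.isPrefixOf a = false)) :
    ∀ (n : Nat) (m : List Char) (s : List Int), m.length ≤ n → pvDec Cl m = true →
    pvScanB (pvIdx Cl) m [] s = s ++ pvG Cl m := by
  intro n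
  induction n with
  | zero =>
    intro m s hlen hm
    have : m = [] := List.eq_nil_of_length_eq_zero (by omega)
    subst this
    simp [pvScanB, pvG]
  | succ n ih =>
    intro m s hlen hm
    by_cases hmnil : m = []
    · subst hmnil; simp [pvScanB, pvG]
    · obtain ⟨ch, t, hms⟩ := List.exists_cons_of_ne_nil hmnil
      have hm' := hm
      rw [hms, pvDec_cons, List.any_eq_true] at hm'
      obtain ⟨c, hcmem, hc⟩ := hm'
      simp only [Bool.and_eq_true, Bool.not_eq_true', List.isEmpty_eq_false_iff,
        List.isPrefixOf_iff_prefix] at hc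
      obtain ⟨k, hk, rfl⟩ := List.mem_iff_getElem.mp hcmem
      have hne : Cl[k] ≠ [] := hc.1.1
      have hpfx : Cl[k] <+: (ch :: t) := hc.1.2
      obtain ⟨r, hr⟩ := hc.1.2
      have hdrop : (ch :: t).drop Cl[k].length = r := by
        rw [← hr, List.drop_left]
      have hdec' : pvDec Cl r = true := by
        have := pv_dec_drop hPF (hms ▸ hm) hk hne hpfx
        rwa [hdrop] at this
      have hG : pvG Cl m = (k : Int) :: pvG Cl r := by
        rw [hms, pv_G_cons hPF hk hne hpfx, hdrop]
      have hrlen : r.length ≤ n := by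
        have h1 : 1 ≤ Cl[k].length := List.length_pos_iff.mpr hne
        have := congrArg List.length hr
        simp at this
        rw [hms] at hlen
        simp at hlen
        omega
      rw [hG, hms, ← hr]
      rw [pv_scan_code hPF hk Cl[k] [] r s (by simp) hne]
      rw [ih r (s ++ [(k : Int)]) hrlen hdec']
      simp

-- ===== VERDICT (by name: the statement is the Claim_ definition above) =====
theorem instant_decode_spec : Claim_equal_instant_decode := by
  intro m C _ hPre
  rcases hPre with h0 | ⟨hNE, hPF, ws, hws, hfl⟩
  · unfold Spec_instant_decode instant_decode instant_decode_alt
    rw [h0]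
    rfl
  have hDec : pvDec (C.map String.toList) m.toList = true := pvDec_of_parts _ ws _ hws hfl
  unfold Spec_instant_decode instant_decode instant_decode_alt
  rw [pv_while hNE hPF (m.toList.length + 1) m.toList [] hDec (by omega)]
  rw [pv_scanB hPF m.toList.length m.toList [] (le_refl _) hDec]
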